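-- pv_equiv track=rewrite | github.com/zruibin/QuickTalk | creaction/service/like/queryLike.py | __packageData
-- ===== SOURCE A (Python) =====
-- def __packageData(likeUUIDList, resultList):
--     tempList = []
--     for data in resultList:
--         tempList.append(data[0])
--
--     dataDict = {}
--     for uuid in likeUUIDList:
--         if uuid in tempList:
--             dataDict[uuid] = 1
--         else:
--             dataDict[uuid] = 0
--     return dataDict
-- ===== SOURCE B (Python) =====
-- def __packageData(likeUUIDList, resultList):
--     dataDict = {uuid: 0 for uuid in likeUUIDList}
--     for data in resultList:
--         id = data[0]
--         if id in dataDict: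
--             dataDict[id] = 1
--     return dataDict
-- ===== Notes on version B (the rewrite author's own statement) =====
-- stated objective: faster
-- what changed: B pre-builds the dict with value 0 for every uuid and then makes a single pass over resultList flipping existing keys to 1, instead of materialising a tempList of first elements and scanning it once per uuid.
import Mathlib
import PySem

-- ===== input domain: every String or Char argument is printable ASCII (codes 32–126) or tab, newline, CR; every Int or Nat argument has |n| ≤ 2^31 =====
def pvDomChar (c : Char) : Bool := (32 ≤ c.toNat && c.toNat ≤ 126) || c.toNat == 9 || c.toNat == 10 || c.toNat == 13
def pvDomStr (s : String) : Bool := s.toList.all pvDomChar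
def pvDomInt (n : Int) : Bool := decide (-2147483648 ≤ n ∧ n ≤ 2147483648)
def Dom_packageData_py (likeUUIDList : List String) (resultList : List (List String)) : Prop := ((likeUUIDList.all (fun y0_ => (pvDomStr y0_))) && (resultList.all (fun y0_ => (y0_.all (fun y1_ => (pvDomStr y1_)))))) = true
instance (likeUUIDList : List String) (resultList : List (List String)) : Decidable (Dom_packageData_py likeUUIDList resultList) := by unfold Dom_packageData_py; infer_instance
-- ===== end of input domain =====

-- B replaces A's per-uuid scan of a tempList of first elements by a 0-initialised dict and one
-- pass over resultList (objective: faster, O(n*m) -> O(n+m)).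

-- ===== PORT A =====
-- data[0] under Pre_ (every row nonempty): pyGet? returns some; .getD "" is never taken
def packageData_py (likeUUIDList : List String) (resultList : List (List String)) : List (String × Int) :=
  let tempList := resultList.foldl (fun acc data => acc ++ [(PySem.List.pyGet? data 0).getD ""]) []
  let dataDict := likeUUIDList.foldl
    (fun d uuid => if tempList.contains uuid then d.insert uuid (1 : Int) else d.insert uuid (0 : Int))
    (PySem.Dict.empty : PySem.Dict String Int)
  dataDict.items

-- ===== PORT B =====
def packageData_py_alt (likeUUIDList : List String) (resultList : List (List String)) : List (String × Int) :=
  let d0 := likeUUIDList.foldl (fun d uuid => d.insert uuid (0 : Int)) (PySem.Dict.empty : PySem.Dict String Int)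
  let d := resultList.foldl
    (fun d data =>
      let id := (PySem.List.pyGet? data 0).getD ""
      if d.contains id then d.insert id (1 : Int) else d) d0
  d.items

-- ===== PRECONDITION & SPEC =====
-- Pre_ excludes inputs where some row of resultList is empty: there data[0] raises IndexError in A (and in B).
def Pre_packageData_py (likeUUIDList : List String) (resultList : List (List String)) : Prop :=
  ∀ data ∈ resultList, data ≠ []
instance (likeUUIDList : List String) (resultList : List (List String)) : Decidable (Pre_packageData_py likeUUIDList resultList) := by unfold Pre_packageData_py; infer_instance
def pvWitness_packageData_py : List String × List (List String) := (["a", "b"], [["a", "x"], ["c"]])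

def Spec_packageData_py (likeUUIDList : List String) (resultList : List (List String)) (out : List (String × Int)) : Prop := out = packageData_py_alt likeUUIDList resultList
instance (likeUUIDList : List String) (resultList : List (List String)) (out : List (String × Int)) : Decidable (Spec_packageData_py likeUUIDList resultList out) := by unfold Spec_packageData_py; infer_instance

-- ===== CLAIM (what is proved, stated in full; the proofs are below) =====
def Claim_equal_packageData_py : Prop := ∀ (likeUUIDList : List String) (resultList : List (List String)), Dom_packageData_py likeUUIDList resultList → Pre_packageData_py likeUUIDList resultList → Spec_packageData_py likeUUIDList resultList (packageData_py likeUUIDList resultList)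

-- ===== LEMMAS AND PROOFS =====

-- A's tempList loop is map of the head extractor
theorem pv_foldl_append_map {α β : Type} (h : α → β) (l : List α) (acc : List β) :
    l.foldl (fun a x => a ++ [h x]) acc = acc ++ l.map h := by
  induction l generalizing acc with
  | nil => simp
  | cons x t ih => simp [List.foldl, ih, List.append_assoc]

-- value-map of a dict (keeps keys and order, value becomes f key)
def pvMapf (f : String → Int) (d : PySem.Dict String Int) : PySem.Dict String Int :=
  PySem.Dict.mk (d.items.map (fun p => (p.1, f p.1)))

theorem pv_keys_mapf (f : String → Int) (d : PySem.Dict String Int) :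
    (pvMapf f d).keys = d.keys := by
  simp [pvMapf, PySem.Dict.keys]

theorem pv_contains_mapf (f : String → Int) (d : PySem.Dict String Int) (k : String) :
    (pvMapf f d).contains k = d.contains k := by
  simp [PySem.Dict.contains_eq_decide_mem_keys, pv_keys_mapf]

theorem pv_insert_mapf (f : String → Int) (d : PySem.Dict String Int) (u : String) :
    (pvMapf f d).insert u (f u) = pvMapf f (d.insert u 0) := by
  apply PySem.Dict.ext
  by_cases hc : d.contains u
  · rw [PySem.Dict.items_insert_of_contains _ _ (by rw [pv_contains_mapf]; exact hc)]
    unfold pvMapf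
    rw [PySem.Dict.items_insert_of_contains _ _ hc]
    simp only [PySem.Dict.items, List.map_map]
    apply List.map_congr_left
    intro p _
    by_cases he : p.1 = u
    · simp [he]
    · simp [he]
  · rw [PySem.Dict.items_insert_of_not_contains _ _ (by rw [pv_contains_mapf]; simpa using hc)]
    unfold pvMapf
    rw [PySem.Dict.items_insert_of_not_contains _ _ (by simpa using hc)]
    simp

-- A's uuid loop starting from a value-mapped dict is the plain 0-insert loop value-mapped
theorem pv_foldl_insert_mapf (f : String → Int) (us : List String) (d : PySem.Dict String Int) :
    us.foldl (fun d u => d.insert u (f u)) (pvMapf f d)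
      = pvMapf f (us.foldl (fun d u => d.insert u 0) d) := by
  induction us generalizing d with
  | nil => rfl
  | cons u t ih => simp only [List.foldl, pv_insert_mapf, ih]

-- B's result loop sets existing keys occurring among hs to 1, entrywise
theorem pv_foldl_mark (hs : List String) (d : PySem.Dict String Int) :
    hs.foldl (fun d id => if d.contains id then d.insert id (1 : Int) else d) d
      = PySem.Dict.mk (d.items.map (fun p => (p.1, if hs.contains p.1 then (1 : Int) else p.2))) := by
  induction hs generalizing d with
  | nil =>
    simp only [List.foldl, List.contains_nil, if_neg Bool.false_ne_true]
    apply (PySem.Dict.ext _).symm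
    simp
  | cons id t ih =>
    simp only [List.foldl]
    rw [ih]
    apply PySem.Dict.ext
    simp only [PySem.Dict.items]
    by_cases hc : d.contains id
    · rw [if_pos hc, PySem.Dict.items_insert_of_contains _ _ hc]
      simp only [List.map_map]
      apply List.map_congr_left
      intro p _
      by_cases he : p.1 = id
      · simp [he]
      · simp [he, List.contains_cons, beq_iff_eq]
    · rw [if_neg hc]
      apply List.map_congr_left
      intro p hp
      have hne : p.1 ≠ id := by
        intro he
        apply hc
        rw [PySem.Dict.contains_iff_mem_keys]
        exact he ▸ PySem.Dict.mem_keys_of_mem_items _ hp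
      simp [hne, List.contains_cons, beq_iff_eq]

-- every value in the 0-insert dict is 0
theorem pv_values_zero (us : List String) (d : PySem.Dict String Int)
    (h : ∀ p ∈ d.items, p.2 = (0 : Int)) :
    ∀ p ∈ (us.foldl (fun d u => d.insert u (0 : Int)) d).items, p.2 = (0 : Int) := by
  induction us generalizing d with
  | nil => exact h
  | cons u t ih =>
    simp only [List.foldl]
    apply ih
    intro p hp
    rcases (PySem.Dict.mem_items_insert _ _ _ _).1 hp with h1 | h2
    · simp [h1]
    · exact h p h2.1

-- ===== VERDICT (by name: the statement is the Claim_ definition above) =====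
theorem packageData_py_spec : Claim_equal_packageData_py := by
  intro us rs _ _
  show packageData_py us rs = packageData_py_alt us rs
  unfold packageData_py packageData_py_alt
  simp only []
  set h : List String → String := fun data => (PySem.List.pyGet? data 0).getD "" with hh
  have htemp : rs.foldl (fun acc data => acc ++ [h data]) [] = rs.map h :=
    by simpa using pv_foldl_append_map h rs []
  rw [htemp]
  set temp := rs.map h with htdef
  set f : String → Int := fun u => if temp.contains u then 1 else 0 with hf
  -- A's loop body as a single insert of f u
  have hA : (us.foldl (fun d u => if temp.contains u then d.insert u (1 : Int) else d.insert u (0 : Int))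
      (PySem.Dict.empty : PySem.Dict String Int))
      = us.foldl (fun d u => d.insert u (f u)) (PySem.Dict.empty : PySem.Dict String Int) := by
    congr 1
    funext d u
    by_cases hm : u ∈ temp <;> simp [hf, hm]
  have hmapf_empty : (PySem.Dict.empty : PySem.Dict String Int) = pvMapf f PySem.Dict.empty := by
    apply PySem.Dict.ext; rfl
  set d0 := us.foldl (fun d u => d.insert u (0 : Int)) (PySem.Dict.empty : PySem.Dict String Int) with hd0
  -- A's dict is d0 value-mapped by f
  have hAd : us.foldl (fun d u => d.insert u (f u)) (PySem.Dict.empty : PySem.Dict String Int) = pvMapf f d0 := by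
    rw [hmapf_empty, pv_foldl_insert_mapf]
  -- B's loop over rows equals the loop over heads
  have hB : rs.foldl (fun d data =>
        if d.contains (h data) then d.insert (h data) (1 : Int) else d) d0
      = temp.foldl (fun d id => if d.contains id then d.insert id (1 : Int) else d) d0 := by
    rw [htdef, List.foldl_map]
  rw [hA, hAd, hB, pv_foldl_mark]
  have hz : ∀ p ∈ d0.items, p.2 = (0 : Int) := pv_values_zero us PySem.Dict.empty (by intro p hp; simp [PySem.Dict.empty] at hp)
  unfold pvMapf
  simp only [PySem.Dict.items]
  apply List.map_congr_left
  intro p hp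
  by_cases hm : p.1 ∈ temp <;> simp [hf, hm, hz p hp]
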